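-- pv_equiv track=rewrite | github.com/SeedLabTEC/ISAcreator | Modeling/readArchitectureFile.py | getInstSize
-- ===== SOURCE A (Python) =====
-- def getInstSize(pFileElements):
--     instSize = None
--     for element in pFileElements:
--         try:
--             if(element['instructionSize'] != ""):
--                 instSize = element
--         except:
--             continue
--     return instSize
-- ===== SOURCE B (Python) =====
-- def getInstSize(pFileElements):
--     for element in reversed(list(pFileElements)):
--         try:
--             if element['instructionSize'] != "":
--                 return element
--         except:
--             continue
--     return None
-- ===== Notes on version B (the rewrite author's own statement) =====
-- stated objective: idiomatic
-- what changed: B scans the list from the end and returns on the first element whose 'instructionSize' is present and non-empty (early exit), instead of A's full forward scan that keeps overwriting a last-hit accumulator.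
import Mathlib
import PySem

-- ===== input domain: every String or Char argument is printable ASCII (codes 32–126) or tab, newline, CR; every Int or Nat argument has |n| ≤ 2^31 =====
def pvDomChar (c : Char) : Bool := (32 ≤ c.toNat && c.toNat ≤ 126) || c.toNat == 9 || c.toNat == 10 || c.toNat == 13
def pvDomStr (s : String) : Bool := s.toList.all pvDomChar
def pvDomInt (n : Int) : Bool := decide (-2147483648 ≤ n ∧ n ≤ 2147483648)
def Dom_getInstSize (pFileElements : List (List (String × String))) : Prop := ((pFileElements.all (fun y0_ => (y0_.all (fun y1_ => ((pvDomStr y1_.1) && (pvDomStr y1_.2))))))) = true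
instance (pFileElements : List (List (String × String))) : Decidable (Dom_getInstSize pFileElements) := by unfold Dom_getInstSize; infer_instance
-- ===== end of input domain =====

-- B replaces A's forward accumulate-last scan by a reverse scan with early return on the first hit (idiomatic).


-- dict lookup element['instructionSize']: first matching key (none = KeyError, caught by the bare except)
def pvLookupIS (e : List (String × String)) : Option String :=
  (e.find? (fun p => p.1 == "instructionSize")).map (·.2)

-- ===== PORT A =====
def getInstSize (pFileElements : List (List (String × String))) : Option (List (String × String)) :=
  pFileElements.foldl (fun instSize element =>
    match pvLookupIS element with
    | some s => if s ≠ "" then some element else instSize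
    | none => instSize) none

-- ===== PORT B =====
-- the loop body of Source B: first element (of the already-reversed list) with a non-empty 'instructionSize'
def pvRevScan : List (List (String × String)) → Option (List (String × String))
  | [] => none
  | element :: rest =>
    match pvLookupIS element with
    | some s => if s ≠ "" then some element else pvRevScan rest
    | none => pvRevScan rest

def getInstSize_alt (pFileElements : List (List (String × String))) : Option (List (String × String)) :=
  pvRevScan pFileElements.reverse

-- ===== PRECONDITION & SPEC =====
def Spec_getInstSize (pFileElements : List (List (String × String))) (out : Option (List (String × String))) : Prop := out = getInstSize_alt pFileElements
instance (pFileElements : List (List (String × String))) (out : Option (List (String × String))) : Decidable (Spec_getInstSize pFileElements out) := by unfold Spec_getInstSize; infer_instance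

-- ===== CLAIM (what is proved, stated in full; the proofs are below) =====
def Claim_equal_getInstSize : Prop := ∀ (pFileElements : List (List (String × String))), Dom_getInstSize pFileElements → Spec_getInstSize pFileElements (getInstSize pFileElements)

-- ===== LEMMAS AND PROOFS =====
theorem foldl_eq_revScan_or (xs : List (List (String × String)))
    (acc : Option (List (String × String))) :
    xs.foldl (fun instSize element =>
      match pvLookupIS element with
      | some s => if s ≠ "" then some element else instSize
      | none => instSize) acc = (pvRevScan xs.reverse).or acc := by
  induction xs using List.reverseRecOn generalizing acc with
  | nil => simp [pvRevScan]
  | append_singleton ys e ih =>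
    rw [List.foldl_append, List.reverse_append]
    simp only [List.reverse_cons, List.reverse_nil, List.nil_append, List.singleton_append,
      List.foldl_cons, List.foldl_nil, pvRevScan]
    cases h : pvLookupIS e with
    | none => exact ih acc
    | some s =>
      by_cases hs : s ≠ ""
      · simp only [if_pos hs]
        simp [pvRevScan]
      · simp only [if_neg hs]
        exact ih acc

-- ===== VERDICT (by name: the statement is the Claim_ definition above) =====
theorem getInstSize_spec : Claim_equal_getInstSize := by
  intro xs _
  unfold Spec_getInstSize getInstSize getInstSize_alt
  rw [foldl_eq_revScan_or, Option.or_none]
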